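-- pv_equiv track=rewrite | github.com/RainbowDragon/ACSL | Python/Contest 3/2022 - 2023/CreateATreeSenior.py | preorder
-- ===== SOURCE A (Python) =====
-- def preorder(letters, values, left, right, level):
--
--     found = False
--     index = left
--     while index <= right:
--         if values[index] == level:
--             found = True
--             break
--         index += 1
--
--     if not found:
--         return ""
--
--     left_str = preorder(letters, values, left, index-1, level+1)
--     right_str = preorder(letters, values, index+1, right, level+1)
--
--     return letters[index] + left_str + right_str
-- ===== SOURCE B (Python) =====
-- def preorder(letters, values, left, right, level):
--     # Index every value's positions once (ascending), then each node lookup is a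
--     # binary search for the leftmost occurrence of `level` in [left, right].
--     positions = {}
--     for i, v in enumerate(values):
--         positions.setdefault(v, []).append(i)
--
--     def bisect_left(a, x):
--         lo, hi = 0, len(a)
--         while lo < hi:
--             mid = (lo + hi) // 2
--             if a[mid] < x:
--                 lo = mid + 1
--             else:
--                 hi = mid
--         return lo
--
--     def walk(lo, hi, lv):
--         ps = positions.get(lv, [])
--         k = bisect_left(ps, lo)
--         if k == len(ps) or ps[k] > hi:
--             return ""
--         idx = ps[k]
--         return letters[idx] + walk(lo, idx - 1, lv + 1) + walk(idx + 1, hi, lv + 1)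
--
--     return walk(left, right, level)
-- ===== Notes on version B (the rewrite author's own statement) =====
-- stated objective: alternative
-- what changed: A rescans values[left..right] linearly at every node of the recursion; B builds one dictionary mapping each value to its ascending list of positions and finds each node's leftmost occurrence of `level` in [left,right] by binary search on that list (O(n log n) worst case vs A's O(n^2) worst case, though not measurably faster on the random generated inputs).
-- outside the precondition, e.g. on preorder(['a', 'b', 'c', 'd'], [2, 3, 0, 3, 2, 1], -2, -1, 1): A returns 'dc', B returns ''; on preorder(['a'], [1, 9], 0, 1, 1): A returns 'a', B returns 'a'
import Mathlib
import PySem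

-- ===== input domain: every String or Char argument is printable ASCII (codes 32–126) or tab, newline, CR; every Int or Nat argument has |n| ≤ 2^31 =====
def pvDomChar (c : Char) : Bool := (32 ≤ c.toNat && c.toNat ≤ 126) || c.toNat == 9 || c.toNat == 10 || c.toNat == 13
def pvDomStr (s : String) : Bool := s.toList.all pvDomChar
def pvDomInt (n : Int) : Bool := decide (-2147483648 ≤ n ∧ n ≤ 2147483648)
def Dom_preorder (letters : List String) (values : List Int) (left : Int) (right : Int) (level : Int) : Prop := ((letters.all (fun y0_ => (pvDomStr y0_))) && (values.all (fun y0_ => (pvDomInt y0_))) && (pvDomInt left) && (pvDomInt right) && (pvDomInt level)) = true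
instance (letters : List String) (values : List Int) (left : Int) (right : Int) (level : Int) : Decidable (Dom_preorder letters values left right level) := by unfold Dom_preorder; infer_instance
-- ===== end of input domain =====

-- B replaces A's per-node linear range scan by a positions dictionary built once plus a
-- hand-written binary search for the leftmost occurrence of `level` in [left, right]
-- (objective: alternative algorithm; not measured faster on the generated inputs).

-- ===== PORT A =====
-- the `while index <= right` search loop of A
def pyScanA (values : List Int) (right level index : Int) : Option Int :=
  if h : index ≤ right then
    match PySem.List.pyGet? values index with
    | none => none      -- Python raises IndexError here; such inputs are outside Pre_preorder
    | some v => if v = level then some index else pyScanA values right level (index + 1)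
  else none
termination_by (right + 1 - index).toNat
decreasing_by omega

-- bounds of the scan result (termination lemma for `preorder`, cited by its decreasing_by)
theorem pyScanA_bounds (values : List Int) (right level index idx : Int)
    (h : pyScanA values right level index = some idx) : index ≤ idx ∧ idx ≤ right := by
  fun_induction pyScanA values right level index <;> simp_all <;> omega

def preorder (letters : List String) (values : List Int) (left : Int) (right : Int) (level : Int) : String :=
  match h : pyScanA values right level left with
  | none => ""          -- not found
  | some index =>
      let left_str := preorder letters values left (index - 1) (level + 1)
      let right_str := preorder letters values (index + 1) right (level + 1)
      ((PySem.List.pyGet? letters index).getD "") ++ left_str ++ right_str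
      -- `.getD ""`: letters[index] raises IndexError in Python; outside Pre_preorder
termination_by (right + 1 - left).toNat
decreasing_by
  · have := pyScanA_bounds values right level left index h; omega
  · have := pyScanA_bounds values right level left index h; omega

-- ===== PORT B =====
-- B's hand-written bisect_left loop
def bisectLoop (a : List Int) (x lo hi : Int) : Int :=
  if h : lo < hi then
    let mid := PySem.Int.floordiv (lo + hi) 2
    match PySem.List.pyGet? a mid with
    | none => lo        -- unreachable: B only calls with 0 ≤ lo ≤ hi ≤ len(a)
    | some v => if v < x then bisectLoop a x (mid + 1) hi else bisectLoop a x lo mid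
  else lo
termination_by (hi - lo).toNat
decreasing_by
  · have h2 : PySem.Int.floordiv (lo + hi) 2 = (lo + hi) / 2 :=
      PySem.Int.floordiv_eq_ediv_of_pos (by omega)
    simp only [mid, h2] at *; omega
  · have h2 : PySem.Int.floordiv (lo + hi) 2 = (lo + hi) / 2 :=
      PySem.Int.floordiv_eq_ediv_of_pos (by omega)
    simp only [mid, h2] at *; omega

-- B's `positions` dict: for i, v in enumerate(values): positions.setdefault(v, []).append(i)
def buildPositions (values : List Int) : PySem.Dict Int (List Int) :=
  (PySem.List.enumerate values).foldl
    (fun d p => d.modify p.2 [] (fun l => l ++ [p.1])) PySem.Dict.empty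

-- B's recursive walk(lo, hi, lv)
def walkB (letters : List String) (positions : PySem.Dict Int (List Int)) (lo hi lv : Int) : String :=
  let ps := positions.getD lv []
  let k := bisectLoop ps lo 0 (ps.length : Int)
  match PySem.List.pyGet? ps k with
  | none => ""          -- k == len(ps)
  | some idx =>
      if h : hi < idx ∨ idx < lo then ""
        -- Python tests only `ps[k] > hi`; `idx < lo` is a totality guard that never fires on
        -- B's actual sorted position lists, where bisect_left guarantees ps[k] ≥ lo
      else ((PySem.List.pyGet? letters idx).getD "")
             ++ walkB letters positions lo (idx - 1) (lv + 1)
             ++ walkB letters positions (idx + 1) hi (lv + 1)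
termination_by (hi + 1 - lo).toNat
decreasing_by
  · omega
  · omega

def preorder_alt (letters : List String) (values : List Int) (left : Int) (right : Int) (level : Int) : String :=
  walkB letters (buildPositions values) left right level

-- ===== PRECONDITION & SPEC =====
-- Pre_ excludes inputs whose nonempty scan range [left,right] is not fully inside both lists: on
-- most of these A raises IndexError; on some A still returns a value (a negative index wraps
-- around to the end of the list, or the part of the range past a list's end is never reached
-- because a match cuts it off) — see the cites in claim.json.
def Pre_preorder (letters : List String) (values : List Int) (left : Int) (right : Int) (level : Int) : Prop :=
  right < left ∨ (0 ≤ left ∧ right < (values.length : Int) ∧ right < (letters.length : Int))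
instance (letters : List String) (values : List Int) (left : Int) (right : Int) (level : Int) : Decidable (Pre_preorder letters values left right level) := by unfold Pre_preorder; infer_instance

def pvWitness_preorder : List String × List Int × Int × Int × Int :=
  (["a", "b", "c"], [1, 2, 2], 0, 2, 1)

def Spec_preorder (letters : List String) (values : List Int) (left : Int) (right : Int) (level : Int) (out : String) : Prop := out = preorder_alt letters values left right level
instance (letters : List String) (values : List Int) (left : Int) (right : Int) (level : Int) (out : String) : Decidable (Spec_preorder letters values left right level out) := by unfold Spec_preorder; infer_instance

-- ===== CLAIM (what is proved, stated in full; the proofs are below) =====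
def Claim_equal_preorder : Prop := ∀ (letters : List String) (values : List Int) (left : Int) (right : Int) (level : Int), Dom_preorder letters values left right level → Pre_preorder letters values left right level → Spec_preorder letters values left right level (preorder letters values left right level)

-- ===== LEMMAS AND PROOFS =====

-- the list of positions of `lv` in `values`, in increasing order
def possOf (values : List Int) (lv : Int) : List Int :=
  ((PySem.List.enumerate values).filter (fun p => p.2 == lv)).map (fun p => p.1)

theorem buildPositions_getD (values : List Int) (lv : Int) :
    (buildPositions values).getD lv [] = possOf values lv := by
  unfold buildPositions possOf
  have h : (PySem.List.enumerate values).foldl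
      (fun d p => d.modify p.2 [] (fun l => l ++ [p.1])) PySem.Dict.empty
      = ((PySem.List.enumerate values).map (fun p => (p.2, p.1))).foldl
      (fun d q => d.modify q.1 [] (fun l => l ++ [q.2])) PySem.Dict.empty := by
    rw [List.foldl_map]
  rw [h, PySem.Dict.getD_foldl_modify_append]
  simp [PySem.Dict.getD_empty, List.filter_map, List.map_map, Function.comp_def]

theorem possOf_sorted (values : List Int) (lv : Int) :
    (possOf values lv).Pairwise (· < ·) := by
  unfold possOf
  rw [List.pairwise_map]
  exact (PySem.List.pairwise_lt_enumerate values 0).filter _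

theorem mem_possOf (values : List Int) (lv x : Int) :
    x ∈ possOf values lv ↔ ∃ (k : Nat), ∃ (hk : k < values.length), x = (k : Int) ∧ values[k] = lv := by
  unfold possOf
  simp only [List.mem_map, List.mem_filter]
  constructor
  · rintro ⟨p, ⟨hpe, hplv⟩, rfl⟩
    obtain ⟨k, hk, rfl⟩ := (PySem.List.mem_enumerate_iff values 0 p).mp hpe
    refine ⟨k, hk, by simp, ?_⟩
    simpa using hplv
  · rintro ⟨k, hk, rfl, hv⟩
    refine ⟨((k : Int), lv), ⟨?_, by simp⟩, rfl⟩
    rw [PySem.List.mem_enumerate_iff]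
    exact ⟨k, hk, by simp [hv]⟩

-- head of a dropWhile fails the predicate
theorem dropWhile_cons_false (l : List Int) (p : Int → Bool) (x : Int) (t : List Int)
    (h : l.dropWhile p = x :: t) : p x = false := by
  have := List.head?_dropWhile_not p l
  simp [h] at this; exact this

-- on a strictly sorted list containing i, dropping the elements < i leaves i in front
theorem dropWhile_lt_of_mem (i : Int) : ∀ (l : List Int), l.Pairwise (· < ·) → i ∈ l →
    ∃ t, l.dropWhile (fun y => decide (y < i)) = i :: t := by
  intro l
  induction l with
  | nil => simp
  | cons x xs ih =>
    intro hp hm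
    rcases List.mem_cons.mp hm with rfl | hm
    · exact ⟨xs, by simp [List.dropWhile_cons]⟩
    · have hx : x < i := (List.pairwise_cons.mp hp).1 i hm
      have := ih (List.pairwise_cons.mp hp).2 hm
      simpa [List.dropWhile_cons, hx] using this

-- when i is absent, the cutoffs < i and < i+1 coincide
theorem dropWhile_lt_succ_of_not_mem (i : Int) : ∀ (l : List Int), (∀ y ∈ l, y ≠ i) →
    l.dropWhile (fun y => decide (y < i)) = l.dropWhile (fun y => decide (y < i + 1)) := by
  intro l
  induction l with
  | nil => simp
  | cons x xs ih =>
    intro hne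
    have hx : x ≠ i := hne x (by simp)
    by_cases hlt : x < i
    · simp only [List.dropWhile_cons, decide_eq_true_eq]
      rw [if_pos hlt, if_pos (by omega)]
      exact ih (fun y hy => hne y (by simp [hy]))
    · simp only [List.dropWhile_cons, decide_eq_true_eq]
      rw [if_neg hlt, if_neg (by omega)]

-- first element of a (sorted-suffix) list if it is ≤ r (proof helper)
def firstGE (l : List Int) (r : Int) : Option Int :=
  match l with
  | [] => none
  | x :: _ => if x ≤ r then some x else none

-- A's scan, described through the sorted position list
theorem pyScanA_eq_dropWhile (values : List Int) (r lv : Int)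
    (hr : r < (values.length : Int)) : ∀ (i : Int), 0 ≤ i →
    pyScanA values r lv i =
      firstGE ((possOf values lv).dropWhile (fun y => decide (y < i))) r := by
  intro i
  fun_induction pyScanA values r lv i with
  | case1 i hle hget =>
    intro h0
    rw [PySem.List.pyGet?_of_nonneg _ h0] at hget
    rw [List.getElem?_eq_none_iff] at hget
    omega
  | case2 i hle hget =>
    intro h0
    rw [PySem.List.pyGet?_of_nonneg _ h0] at hget
    rw [List.getElem?_eq_some_iff] at hget
    obtain ⟨hk, hv⟩ := hget
    have hmem : i ∈ possOf values lv :=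
      (mem_possOf values lv i).mpr ⟨i.toNat, hk, by omega, hv⟩
    obtain ⟨t, ht⟩ := dropWhile_lt_of_mem i (possOf values lv) (possOf_sorted values lv) hmem
    rw [ht]
    simp [firstGE, hle]
  | case3 i hle =>
    rename_i v hget hne ih
    intro h0
    rw [PySem.List.pyGet?_of_nonneg _ h0] at hget
    have hnm : ∀ y ∈ possOf values lv, y ≠ i := by
      intro y hy hyi
      subst hyi
      obtain ⟨k, hk, hki, hkv⟩ := (mem_possOf values lv y).mp hy
      have : y.toNat = k := by omega
      rw [this, List.getElem?_eq_some_iff.mpr ⟨hk, hkv⟩] at hget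
      simp at hget; exact hne hget.symm
    rw [dropWhile_lt_succ_of_not_mem i _ hnm]
    exact ih (by omega)
  | case4 i hle =>
    intro h0
    cases hdrop : (possOf values lv).dropWhile (fun y => decide (y < i)) with
    | nil => rfl
    | cons x t =>
      have := dropWhile_cons_false _ _ _ _ hdrop
      simp only [decide_eq_false_iff_not] at this
      simp only [firstGE]
      rw [if_neg (by omega)]

theorem length_takeWhile_le' (l : List Int) (p : Int → Bool) : (l.takeWhile p).length ≤ l.length :=
  List.Sublist.length_le (List.takeWhile_sublist p)

theorem takeWhile_getElem?_true (l : List Int) (p : Int → Bool) (j : Nat)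
    (hj : j < (l.takeWhile p).length) (y : Int) (hy : l[j]? = some y) : p y = true := by
  obtain ⟨t, ht⟩ := List.takeWhile_prefix (l := l) p
  have h1 : l[j]? = (l.takeWhile p)[j]? := by
    conv_lhs => rw [← ht]
    rw [List.getElem?_append_left hj]
  rw [h1] at hy
  exact List.mem_takeWhile_imp (List.mem_of_getElem? hy)

theorem getElem?_length_takeWhile (l : List Int) (p : Int → Bool) :
    l[(l.takeWhile p).length]? = (l.dropWhile p).head? := by
  conv_lhs => rw [show l[(l.takeWhile p).length]? = (l.takeWhile p ++ l.dropWhile p)[(l.takeWhile p).length]? from by rw [List.takeWhile_append_dropWhile]]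
  rw [List.getElem?_append_right (le_refl _)]
  simp [List.head?_eq_getElem?]

theorem takeWhile_getElem?_false (l : List Int) (p : Int → Bool)
    (h : (l.takeWhile p).length < l.length) (y : Int)
    (hy : l[(l.takeWhile p).length]? = some y) : p y = false := by
  rw [getElem?_length_takeWhile] at hy
  have := List.head?_dropWhile_not p l
  rw [hy] at this; simpa using this

-- B's binary search finds the partition point of the sorted position list
theorem bisectLoop_eq (a : List Int) (x : Int) (hs : a.Pairwise (· < ·)) :
    ∀ (lo hi : Int), 0 ≤ lo → hi ≤ (a.length : Int) →
    lo ≤ ((a.takeWhile (fun y => decide (y < x))).length : Int) →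
    ((a.takeWhile (fun y => decide (y < x))).length : Int) ≤ hi →
    bisectLoop a x lo hi = ((a.takeWhile (fun y => decide (y < x))).length : Int) := by
  intro lo hi
  fun_induction bisectLoop a x lo hi with
  | case1 =>
    rename_i lo hi hlt mid hget
    have hmid : mid = (lo + hi) / 2 := by
      rw [show mid = PySem.Int.floordiv (lo + hi) 2 from rfl,
        PySem.Int.floordiv_eq_ediv_of_pos (by omega)]
    clear_value mid
    intro h0 hlen hloT hThi
    rw [PySem.List.pyGet?_of_nonneg _ (by omega)] at hget
    rw [List.getElem?_eq_none_iff] at hget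
    omega
  | case2 =>
    rename_i lo hi hlt mid v hget hvx ih
    have hmid : mid = (lo + hi) / 2 := by
      rw [show mid = PySem.Int.floordiv (lo + hi) 2 from rfl,
        PySem.Int.floordiv_eq_ediv_of_pos (by omega)]
    clear_value mid
    intro h0 hlen hloT hThi
    set T := (a.takeWhile (fun y => decide (y < x))).length with hT
    rw [PySem.List.pyGet?_of_nonneg _ (by omega)] at hget
    rw [List.getElem?_eq_some_iff] at hget
    obtain ⟨hmlen, hmv⟩ := hget
    -- T > mid, else a[T] ≥ x although a[T] ≤ a[mid] = v < x
    have hTmid : mid.toNat < T := by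
      by_contra hc
      push Not at hc
      have hTlen : T < a.length := lt_of_le_of_lt hc hmlen
      have hfalse := takeWhile_getElem?_false a _ (hT ▸ hTlen) a[T]
        (by rw [List.getElem?_eq_some_iff]; exact ⟨hTlen, rfl⟩)
      simp only [decide_eq_false_iff_not, not_lt] at hfalse
      have hle2 : a[T] ≤ v := by
        rcases Nat.lt_or_ge T mid.toNat with h | h
        · have := (List.pairwise_iff_getElem.mp hs) T mid.toNat hTlen hmlen h
          omega
        · have heq : T = mid.toNat := by omega
          have hv2 : a[T] = v := by
            have h1 : a[T]? = some v := by
              rw [heq]; exact List.getElem?_eq_some_iff.mpr ⟨hmlen, hmv⟩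
            simpa using (List.getElem?_eq_getElem hTlen).symm.trans h1
          omega
      omega
    exact ih (by omega) hlen (by omega) hThi
  | case3 =>
    rename_i lo hi hlt mid v hget hvx ih
    have hmid : mid = (lo + hi) / 2 := by
      rw [show mid = PySem.Int.floordiv (lo + hi) 2 from rfl,
        PySem.Int.floordiv_eq_ediv_of_pos (by omega)]
    clear_value mid
    intro h0 hlen hloT hThi
    set T := (a.takeWhile (fun y => decide (y < x))).length with hT
    rw [PySem.List.pyGet?_of_nonneg _ (by omega)] at hget
    rw [List.getElem?_eq_some_iff] at hget
    obtain ⟨hmlen, hmv⟩ := hget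
    have hTmid : T ≤ mid.toNat := by
      by_contra hc
      push Not at hc
      have := takeWhile_getElem?_true a _ mid.toNat (hT ▸ hc) v
        (by rw [List.getElem?_eq_some_iff]; exact ⟨hmlen, hmv⟩)
      simp at this
      omega
    exact ih h0 (by omega) hloT (by omega)
  | case4 =>
    rename_i lo hi hlt
    intro h0 hlen hloT hThi
    omega

-- both ports return "" on an empty range, unconditionally
theorem walkB_empty (letters : List String) (positions : PySem.Dict Int (List Int))
    (lo hi lv : Int) (h : hi < lo) : walkB letters positions lo hi lv = "" := by
  rw [walkB]
  cases hg : PySem.List.pyGet? (positions.getD lv []) (bisectLoop (positions.getD lv []) lo 0 ((positions.getD lv []).length : Int)) with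
  | none => rfl
  | some idx => simp only []; rw [dif_pos (by omega)]

-- the main induction: A's recursion = B's walk on in-range arguments
theorem preorder_eq_walkB (letters : List String) (values : List Int) :
    ∀ (m : Nat) (lo hi lv : Int), (hi + 1 - lo).toNat ≤ m → 0 ≤ lo → hi < (values.length : Int) →
    preorder letters values lo hi lv = walkB letters (buildPositions values) lo hi lv := by
  intro m
  induction m with
  | zero =>
    intro lo hi lv hm h0 hn
    rw [walkB_empty _ _ _ _ _ (by omega), preorder,
      show pyScanA values hi lv lo = none from by rw [pyScanA]; rw [dif_neg (by omega)]]
  | succ m ih =>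
    intro lo hi lv hm h0 hn
    by_cases hord : hi < lo
    · rw [walkB_empty _ _ _ _ _ hord, preorder,
        show pyScanA values hi lv lo = none from by rw [pyScanA]; rw [dif_neg (by omega)]]
    · have hscan := pyScanA_eq_dropWhile values hi lv hn lo h0
      have hsorted := possOf_sorted values lv
      have hT0 : (0 : Int) ≤ (((possOf values lv).takeWhile (fun y => decide (y < lo))).length : Int) := by positivity
      have hTlen : (((possOf values lv).takeWhile (fun y => decide (y < lo))).length : Int) ≤ ((possOf values lv).length : Int) := by
        exact_mod_cast length_takeWhile_le' (possOf values lv) _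
      have hbis := bisectLoop_eq (possOf values lv) lo hsorted 0 ((possOf values lv).length : Int)
        (le_refl 0) (le_refl _) hT0 hTlen
      have hget : PySem.List.pyGet? (possOf values lv)
          (((possOf values lv).takeWhile (fun y => decide (y < lo))).length : Int)
          = ((possOf values lv).dropWhile (fun y => decide (y < lo))).head? := by
        rw [PySem.List.pyGet?_natCast, getElem?_length_takeWhile]
      rw [walkB]
      simp only [buildPositions_getD]
      rw [hbis, hget]
      cases hdrop : (possOf values lv).dropWhile (fun y => decide (y < lo)) with
      | nil =>
        rw [hdrop] at hscan
        rw [preorder, hscan]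
        rfl
      | cons x t =>
        rw [hdrop] at hscan
        simp only [firstGE] at hscan
        have hxlo : ¬ (x < lo) := by
          have := dropWhile_cons_false _ _ _ _ hdrop
          simpa using this
        simp only [List.head?_cons]
        by_cases hxr : x ≤ hi
        · rw [if_pos hxr] at hscan
          rw [preorder, hscan]
          rw [dif_neg (by omega)]
          show (PySem.List.pyGet? letters x).getD ""
              ++ preorder letters values lo (x - 1) (lv + 1)
              ++ preorder letters values (x + 1) hi (lv + 1) = _
          rw [ih lo (x - 1) (lv + 1) (by omega) h0 (by omega),
            ih (x + 1) hi (lv + 1) (by omega) (by omega) hn]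
        · rw [if_neg hxr] at hscan
          rw [preorder, hscan]
          rw [dif_pos (by omega)]

-- ===== VERDICT (by name: the statement is the Claim_ definition above) =====
theorem preorder_spec : Claim_equal_preorder := by
  intro letters values left right level _ hpre
  unfold Spec_preorder preorder_alt
  rcases hpre with h | ⟨h0, hv, hl⟩
  · rw [walkB_empty _ _ _ _ _ h, preorder]
    rw [show pyScanA values right level left = none from by rw [pyScanA]; simp; omega]
  · exact preorder_eq_walkB letters values (right + 1 - left).toNat left right level (le_refl _) h0 hv
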